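-- pv_equiv track=rewrite | github.com/vrbart/Q-Base-by-MVS-Final | src/ccbs_app/pt_portmap.py | _replace_interface_sections
-- ===== SOURCE A (Python) =====
-- def _replace_interface_sections(text: str, replacement_lines: list[str]) -> tuple[str, bool, str | None]:
--     lines = text.splitlines()
--     trunk_idx = -1
--     end_idx = -1
--     for idx, line in enumerate(lines):
--         lowered = line.strip().lower()
--         if trunk_idx == -1 and lowered.startswith("! ---- uplink trunk"):
--             trunk_idx = idx
--         if lowered == "end":
--             end_idx = idx
--             break
--
--     if trunk_idx == -1:
--         return text, False, "missing '! ---- Uplink trunk ----' marker"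
--     if end_idx == -1 or trunk_idx >= end_idx:
--         return text, False, "missing 'end' marker after trunk section"
--
--     rebuilt = lines[:trunk_idx] + replacement_lines + lines[end_idx:]
--     updated = "\n".join(rebuilt)
--     if text.endswith("\n"):
--         updated += "\n"
--     return updated, updated != text, None
-- ===== SOURCE B (Python) =====
-- def _replace_interface_sections(text: str, replacement_lines: list[str]) -> tuple[str, bool, str | None]:
--     # Streaming state machine over one shared iterator: emit lines before the
--     # trunk marker, splice the replacement, skip to the first 'end' line and
--     # copy the rest.  No indices, no slicing.
--     out = []
--     it = iter(text.splitlines())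
--     for line in it:
--         low = line.strip().lower()
--         if low == "end":
--             return text, False, "missing '! ---- Uplink trunk ----' marker"
--         if low.startswith("! ---- uplink trunk"):
--             break
--         out.append(line)
--     else:
--         return text, False, "missing '! ---- Uplink trunk ----' marker"
--     out.extend(replacement_lines)
--     for line in it:
--         if line.strip().lower() == "end":
--             out.append(line)
--             out.extend(it)
--             break
--     else:
--         return text, False, "missing 'end' marker after trunk section"
--     updated = "\n".join(out)
--     if text.endswith("\n"):
--         updated += "\n"
--     return updated, updated != text, None
-- ===== Notes on version B (the rewrite author's own statement) =====
-- stated objective: alternative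
-- what changed: Replaces A's compute-two-indices-then-slice design with a single-pass streaming state machine over one shared line iterator that builds the output list directly (emit prefix until the trunk marker, splice the replacement, skip to the first 'end', copy the remainder) with no indices or slicing.
import Mathlib
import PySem

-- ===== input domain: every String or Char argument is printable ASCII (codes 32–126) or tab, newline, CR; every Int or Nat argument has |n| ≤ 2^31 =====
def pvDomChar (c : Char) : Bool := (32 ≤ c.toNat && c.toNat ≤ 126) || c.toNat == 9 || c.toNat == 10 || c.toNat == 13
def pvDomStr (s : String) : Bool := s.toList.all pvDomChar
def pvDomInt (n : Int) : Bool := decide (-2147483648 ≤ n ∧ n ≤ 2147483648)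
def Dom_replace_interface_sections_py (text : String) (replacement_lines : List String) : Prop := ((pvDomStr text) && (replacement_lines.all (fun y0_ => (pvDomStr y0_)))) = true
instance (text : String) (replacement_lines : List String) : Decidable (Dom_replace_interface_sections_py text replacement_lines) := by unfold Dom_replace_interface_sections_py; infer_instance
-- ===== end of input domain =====

-- B is a streaming state machine that builds the output directly while scanning once
-- (emit prefix, splice, skip to 'end', copy rest) instead of A's compute-indices-then-slice; same result.

-- ===== PORT A =====
def pvLoopA (ls : List String) (idx trunk : Int) : Int × Int :=
  match ls with
  | [] => (trunk, -1)
  | l :: rest =>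
    let lowered := PySem.Str.lower (PySem.Str.strip l)
    let trunk' := if trunk == -1 && PySem.Str.startswith lowered "! ---- uplink trunk" then idx else trunk
    if lowered == "end" then (trunk', idx) else pvLoopA rest (idx + 1) trunk'

def replace_interface_sections_py (text : String) (replacement_lines : List String) : String × Bool × Option String :=
  let lines := PySem.Str.splitlines text
  let r := pvLoopA lines 0 (-1)
  let trunk_idx := r.1
  let end_idx := r.2
  if trunk_idx = -1 then (text, false, some "missing '! ---- Uplink trunk ----' marker")
  else if end_idx = -1 ∨ trunk_idx ≥ end_idx then (text, false, some "missing 'end' marker after trunk section")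
  else
    let rebuilt := PySem.List.slice lines none (some trunk_idx) ++ replacement_lines ++ PySem.List.slice lines (some end_idx) none
    let updated := PySem.Str.join "\n" rebuilt
    let updated := if PySem.Str.endswith text "\n" then updated ++ "\n" else updated
    (updated, updated != text, none)

-- ===== PORT B =====
-- first for-loop of Source B: consume lines, accumulating emitted ones, until the trunk marker;
-- none = both early exits (an 'end' line first, or the iterator exhausted): missing trunk
def pvAltPhase1 : List String → Option (List String × List String)
  | [] => none
  | l :: ls =>
    let low := PySem.Str.lower (PySem.Str.strip l)
    if low == "end" then none
    else if PySem.Str.startswith low "! ---- uplink trunk" then some ([], ls)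
    else (pvAltPhase1 ls).map (fun pr => (l :: pr.1, pr.2))

-- second for-loop of Source B: skip the rest of the iterator to the first 'end' line;
-- the appended tail is that line plus everything the iterator still holds
def pvAltPhase2 : List String → Option (List String)
  | [] => none
  | l :: ls => if PySem.Str.lower (PySem.Str.strip l) == "end" then some (l :: ls) else pvAltPhase2 ls

def replace_interface_sections_py_alt (text : String) (replacement_lines : List String) : String × Bool × Option String :=
  match pvAltPhase1 (PySem.Str.splitlines text) with
  | none => (text, false, some "missing '! ---- Uplink trunk ----' marker")
  | some (pre, rest) =>
    match pvAltPhase2 rest with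
    | none => (text, false, some "missing 'end' marker after trunk section")
    | some suf =>
      let updated := PySem.Str.join "\n" (pre ++ replacement_lines ++ suf)
      let updated := if PySem.Str.endswith text "\n" then updated ++ "\n" else updated
      (updated, updated != text, none)

-- ===== PRECONDITION & SPEC =====
def Spec_replace_interface_sections_py (text : String) (replacement_lines : List String) (out : String × Bool × Option String) : Prop := out = replace_interface_sections_py_alt text replacement_lines
instance (text : String) (replacement_lines : List String) (out : String × Bool × Option String) : Decidable (Spec_replace_interface_sections_py text replacement_lines out) := by unfold Spec_replace_interface_sections_py; infer_instance

-- ===== CLAIM (what is proved, stated in full; the proofs are below) =====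
def Claim_equal_replace_interface_sections_py : Prop := ∀ (text : String) (replacement_lines : List String), Dom_replace_interface_sections_py text replacement_lines → Spec_replace_interface_sections_py text replacement_lines (replace_interface_sections_py text replacement_lines)

-- ===== LEMMAS AND PROOFS =====

-- exposes one step of A's loop (used to drive the induction)
theorem pvLoopA_cons (l : String) (rest : List String) (idx trunk : Int) :
    pvLoopA (l :: rest) idx trunk =
      (if (PySem.Str.lower (PySem.Str.strip l) == "end") = true then
        ((if trunk == -1 && PySem.Str.startswith (PySem.Str.lower (PySem.Str.strip l)) "! ---- uplink trunk" then idx else trunk), idx)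
      else pvLoopA rest (idx + 1) (if trunk == -1 && PySem.Str.startswith (PySem.Str.lower (PySem.Str.strip l)) "! ---- uplink trunk" then idx else trunk)) := rfl

-- an 'end' line can never also match the trunk marker
theorem pvTrunk_of_end {l : String} (h : (PySem.Str.lower (PySem.Str.strip l) == "end") = true) :
    PySem.Str.startswith (PySem.Str.lower (PySem.Str.strip l)) "! ---- uplink trunk" = false := by
  rw [eq_of_beq h]; decide

-- A's loop after the trunk index is fixed: it only searches for the first 'end' line
set_option maxHeartbeats 1600000 in
theorem pvLoopA_after (rest : List String) (k trunk : Int) (h : ¬ trunk = -1) :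
    (match pvAltPhase2 rest with
      | none => pvLoopA rest k trunk = (trunk, -1)
      | some suf => ∃ m : Nat, pvLoopA rest k trunk = (trunk, k + m) ∧ rest.drop m = suf) := by
  induction rest generalizing k with
  | nil => simp [pvAltPhase2, pvLoopA]
  | cons l ls ih =>
    have hb : (trunk == -1) = false := by simp [h]
    rw [pvAltPhase2, pvLoopA_cons]
    simp only [hb, Bool.false_and, Bool.false_eq_true, if_false]
    cases hE : PySem.Str.lower (PySem.Str.strip l) == "end" with
    | true =>
      simp only [if_true]
      exact ⟨0, by simp, rfl⟩
    | false =>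
      simp only [Bool.false_eq_true, if_false]
      have := ih (k + 1)
      cases hp : pvAltPhase2 ls with
      | none => rw [hp] at this; exact this
      | some suf =>
        rw [hp] at this
        obtain ⟨m, h1, h2⟩ := this
        refine ⟨m + 1, ?_, by simpa using h2⟩
        rw [h1, Prod.mk.injEq]
        exact ⟨rfl, by push_cast [List.length_cons, List.length_nil]; ring⟩

-- the main correspondence between A's index-hunting loop and B's two streaming phases
set_option maxHeartbeats 1600000 in
theorem pvLoopA_main (ls : List String) (k : Int) (hk : 0 ≤ k) :
    (match pvAltPhase1 ls with
      | none => (pvLoopA ls k (-1)).1 = -1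
      | some pr => ∃ t, ls = pr.1 ++ t :: pr.2 ∧
          (match pvAltPhase2 pr.2 with
            | none => pvLoopA ls k (-1) = (k + pr.1.length, -1)
            | some suf => ∃ m : Nat,
                pvLoopA ls k (-1) = (k + pr.1.length, k + pr.1.length + 1 + m) ∧ pr.2.drop m = suf)) := by
  induction ls generalizing k with
  | nil => simp [pvAltPhase1, pvLoopA]
  | cons l ls ih =>
    rw [pvAltPhase1, pvLoopA_cons]
    simp only [beq_self_eq_true, Bool.true_and]
    cases hE : PySem.Str.lower (PySem.Str.strip l) == "end" with
    | true =>
      simp only [if_true, pvTrunk_of_end hE, Bool.false_eq_true, if_false]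
    | false =>
      simp only [Bool.false_eq_true, if_false]
      cases hT : PySem.Str.startswith (PySem.Str.lower (PySem.Str.strip l)) "! ---- uplink trunk" with
      | true =>
        simp only [if_true]
        refine ⟨l, by simp, ?_⟩
        have hkne : ¬ (k = -1) := by omega
        have := pvLoopA_after ls (k + 1) k hkne
        cases hp : pvAltPhase2 ls with
        | none =>
          rw [hp] at this
          simpa using this
        | some suf =>
          rw [hp] at this
          obtain ⟨m, h1, h2⟩ := this
          refine ⟨m, ?_, h2⟩
          rw [h1, Prod.mk.injEq]
          exact ⟨by push_cast [List.length_cons, List.length_nil]; ring, by push_cast [List.length_cons, List.length_nil]; ring⟩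
      | false =>
        simp only [Bool.false_eq_true, if_false]
        have := ih (k + 1) (by omega)
        cases hp : pvAltPhase1 ls with
        | none => rw [hp] at this; simpa using this
        | some pr =>
          rw [hp] at this
          obtain ⟨t, hls, hrest⟩ := this
          simp only [Option.map_some]
          refine ⟨t, by simp [hls], ?_⟩
          cases hp2 : pvAltPhase2 pr.2 with
          | none =>
            rw [hp2] at hrest
            rw [hrest, Prod.mk.injEq]
            exact ⟨by push_cast [List.length_cons, List.length_nil]; ring, rfl⟩
          | some suf =>
            rw [hp2] at hrest
            obtain ⟨m, h1, h2⟩ := hrest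
            refine ⟨m, ?_, h2⟩
            rw [h1, Prod.mk.injEq]
            exact ⟨by push_cast [List.length_cons, List.length_nil]; ring, by push_cast [List.length_cons, List.length_nil]; ring⟩

-- ===== VERDICT (by name: the statement is the Claim_ definition above) =====
theorem replace_interface_sections_py_spec : Claim_equal_replace_interface_sections_py := by
  intro text replacement_lines _
  unfold Spec_replace_interface_sections_py
  unfold replace_interface_sections_py replace_interface_sections_py_alt
  set lines := PySem.Str.splitlines text with hlines
  have hM := pvLoopA_main lines 0 le_rfl
  cases hp : pvAltPhase1 lines with
  | none =>
    rw [hp] at hM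
    simp [hM]
  | some pr =>
    rw [hp] at hM
    obtain ⟨t, hls, hrest⟩ := hM
    cases hp2 : pvAltPhase2 pr.2 with
    | none =>
      rw [hp2] at hrest
      simp [hrest, hp2]
    | some suf =>
      rw [hp2] at hrest
      obtain ⟨m, h1, h2⟩ := hrest
      have h1' : pvLoopA lines 0 (-1)
          = (((pr.1.length : Nat) : Int), (((pr.1.length + 1 + m : Nat)) : Int)) := by
        rw [h1, Prod.mk.injEq]
        exact ⟨by ring, by push_cast; ring⟩
      have hne : ¬ (((pr.1.length : Nat) : Int) = -1) := by omega
      have hne2 : ¬ ((((pr.1.length + 1 + m : Nat)) : Int) = -1 ∨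
          ((pr.1.length : Nat) : Int) ≥ (((pr.1.length + 1 + m : Nat)) : Int)) := by
        rw [not_or]
        refine ⟨by omega, by push_cast; omega⟩
      have htake : lines.take pr.1.length = pr.1 := by
        rw [hls]; exact List.take_left
      have hdrop : lines.drop (pr.1.length + 1 + m) = suf := by
        rw [hls, ← h2, show pr.1.length + 1 + m = pr.1.length + (1 + m) from by ring,
          List.drop_append]
        simp [Nat.add_comm 1 m]
      simp only [h1', if_neg hne, if_neg hne2, hp2,
        PySem.List.slice_to_natCast, PySem.List.slice_from_natCast, htake, hdrop]
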